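-- pv_equiv track=rewrite | github.com/raeez/chiral-bar-cobar | compute/lib/w3_h5_compute.py | _generate_os_basis_recursive
-- ===== SOURCE A (Python) =====
-- from typing import Dict, List, Optional, Tuple, Set
--
-- def _generate_os_basis_recursive(n: int) -> List[Tuple[Tuple[int, int], ...]]:
--     """Generate OS basis recursively.
--
--     Use the fact that OS^{n-1}(C_n) has a basis given by:
--     For each permutation sigma of [1, ..., n-1]:
--       eta_{0, sigma_1} ^ eta_{sigma_1, sigma_2} ^ ... ^ eta_{sigma_{n-2}, sigma_{n-1}}
--
--     These are "path trees" starting at 0.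
--     """
--     if n <= 1:
--         return [()]
--     if n == 2:
--         return [((0, 1),)]
--
--     from itertools import permutations
--     basis = []
--     for perm in permutations(range(1, n)):
--         form = []
--         prev = 0
--         for v in perm:
--             edge = (min(prev, v), max(prev, v))
--             form.append(edge)
--             prev = v
--         basis.append(tuple(form))
--     return basis
-- ===== SOURCE B (Python) =====
-- def _picks(xs):
--     """All ways to pick one element of xs: (picked, rest), in list order."""
--     if not xs:
--         return []
--     x, rest = xs[0], xs[1:]
--     return [(x, rest)] + [(v, [x] + r) for (v, r) in _picks(rest)]
--
-- def _generate_os_basis_recursive(n: int):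
--     """Generate OS basis path-trees by direct backtracking enumeration:
--     extend the path edge by edge, branching over the remaining vertices in
--     list (increasing) order; no itertools, no special cases for small n."""
--     basis = []
--
--     def walk(prev, remaining, form):
--         if not remaining:
--             basis.append(tuple(form))
--             return
--         for v, rest in _picks(remaining):
--             walk(v, rest, form + [(min(prev, v), max(prev, v))])
--
--     walk(0, list(range(1, n)), [])
--     return basis
-- ===== Notes on version B (the rewrite author's own statement) =====
-- stated objective: alternative
-- what changed: Replaced the itertools.permutations loop plus per-permutation edge fold with a direct recursive backtracking enumeration that extends the path edge by edge, branching over the remaining vertices in list order; the n<=1 and n==2 special cases disappear into the recursion.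
import Mathlib
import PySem

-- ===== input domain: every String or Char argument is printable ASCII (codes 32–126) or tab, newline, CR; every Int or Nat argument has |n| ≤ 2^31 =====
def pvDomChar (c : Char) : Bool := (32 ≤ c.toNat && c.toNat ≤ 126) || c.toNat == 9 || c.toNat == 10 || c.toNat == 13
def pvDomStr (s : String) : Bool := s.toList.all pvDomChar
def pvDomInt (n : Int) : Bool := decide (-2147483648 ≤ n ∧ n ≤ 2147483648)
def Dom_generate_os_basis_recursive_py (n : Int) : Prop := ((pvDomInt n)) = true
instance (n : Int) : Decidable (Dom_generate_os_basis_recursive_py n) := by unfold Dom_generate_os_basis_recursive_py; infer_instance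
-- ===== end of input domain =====

-- B replaces A's itertools.permutations-then-fold with a direct backtracking
-- enumeration (extend the path edge by edge over the remaining vertices);
-- objective: alternative decomposition, same output.

-- ===== PORT A =====
-- itertools.permutations on a duplicate-free list, in lexicographic-of-positions
-- order: for each element in list order, prepend it to the permutations of the rest.
def pvPermsA (xs : List Int) : List (List Int) :=
  if xs = [] then [[]]
  else xs.attach.flatMap (fun v => (pvPermsA (xs.erase v.1)).map (v.1 :: ·))
termination_by xs.length
decreasing_by
  have hm := v.2
  have := List.length_erase_of_mem hm
  have : 0 < xs.length := List.length_pos_of_mem hm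
  omega

def generate_os_basis_recursive_py (n : Int) : List (List (Int × Int)) :=
  if n ≤ 1 then [[]]
  else if n = 2 then [[(0, 1)]]
  else
    (pvPermsA (PySem.List.pyRange 1 n 1)).map (fun perm =>
      (perm.foldl (fun (st : List (Int × Int) × Int) v =>
        (st.1 ++ [(min st.2 v, max st.2 v)], v)) ([], 0)).1)

-- ===== PORT B =====
-- _picks xs = all (picked element, rest of the list) pairs, in list order
def pvPicks : List Int → List (Int × List Int)
  | [] => []
  | x :: xs => (x, xs) :: (pvPicks xs).map (fun p => (p.1, x :: p.2))

-- cited by pvEnumB's decreasing_by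
theorem pvPicks_snd_length {p : Int × List Int} : ∀ {xs : List Int}, p ∈ pvPicks xs → p.2.length + 1 = xs.length := by
  intro xs
  induction xs generalizing p with
  | nil => intro h; simp [pvPicks] at h
  | cons x xs ih =>
    intro h
    simp only [pvPicks, List.mem_cons, List.mem_map] at h
    rcases h with h | ⟨q, hq, rfl⟩
    · subst h; simp
    · have := ih hq; simp_all

def pvEnumB (prev : Int) (remaining : List Int) (form : List (Int × Int)) : List (List (Int × Int)) :=
  if remaining.isEmpty then [form]
  else
    (pvPicks remaining).attach.flatMap (fun p =>
      pvEnumB p.1.1 p.1.2 (form ++ [(min prev p.1.1, max prev p.1.1)]))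
termination_by remaining.length
decreasing_by
  have := pvPicks_snd_length p.2
  omega

def generate_os_basis_recursive_py_alt (n : Int) : List (List (Int × Int)) :=
  pvEnumB 0 (PySem.List.pyRange 1 n 1) []

-- ===== PRECONDITION & SPEC =====
def Spec_generate_os_basis_recursive_py (n : Int) (out : List (List (Int × Int))) : Prop := out = generate_os_basis_recursive_py_alt n
instance (n : Int) (out : List (List (Int × Int))) : Decidable (Spec_generate_os_basis_recursive_py n out) := by unfold Spec_generate_os_basis_recursive_py; infer_instance

-- ===== CLAIM (what is proved, stated in full; the proofs are below) =====
def Claim_equal_generate_os_basis_recursive_py : Prop := ∀ (n : Int), Dom_generate_os_basis_recursive_py n → Spec_generate_os_basis_recursive_py n (generate_os_basis_recursive_py n)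

-- ===== LEMMAS AND PROOFS =====

theorem pv_flatMap_attach {α β : Type} (l : List α) (f : α → List β) :
    l.attach.flatMap (fun x => f x.1) = l.flatMap f := by
  conv_rhs => rw [← List.attach_map_subtype_val l]
  rw [List.flatMap_map]

theorem pvEnumB_nil (prev : Int) (form : List (Int × Int)) :
    pvEnumB prev [] form = [form] := by
  rw [pvEnumB]; simp

theorem pvEnumB_cons (prev x : Int) (xs : List Int) (form : List (Int × Int)) :
    pvEnumB prev (x :: xs) form =
      (pvPicks (x :: xs)).flatMap (fun q =>
        pvEnumB q.1 q.2 (form ++ [(min prev q.1, max prev q.1)])) := by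
  rw [pvEnumB]
  simp only [List.isEmpty_cons, Bool.false_eq_true, if_false]
  exact pv_flatMap_attach (pvPicks (x :: xs))
    (fun q => pvEnumB q.1 q.2 (form ++ [(min prev q.1, max prev q.1)]))

theorem pvPermsA_nil : pvPermsA [] = [[]] := by
  rw [pvPermsA]; simp

theorem pvPermsA_cons (x : Int) (xs : List Int) :
    pvPermsA (x :: xs) =
      (x :: xs).flatMap (fun v => (pvPermsA ((x :: xs).erase v)).map (v :: ·)) := by
  rw [pvPermsA]
  simp only [reduceCtorEq, if_neg, not_false_eq_true]
  exact pv_flatMap_attach (x :: xs)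
    (fun v => (pvPermsA ((x :: xs).erase v)).map (v :: ·))

theorem pvPicks_eq_map (xs : List Int) (h : xs.Nodup) :
    pvPicks xs = xs.map (fun v => (v, xs.erase v)) := by
  induction xs with
  | nil => simp [pvPicks]
  | cons x xs ih =>
    rcases List.nodup_cons.mp h with ⟨hx, hnd⟩
    simp only [pvPicks, ih hnd, List.map_cons, List.erase_cons_head, List.map_map]
    congr 1
    apply List.map_congr_left
    intro v hv
    have hne : x ≠ v := fun e => hx (e ▸ hv)
    simp [hne]

theorem pvEnumB_eq_map (k : Nat) :
    ∀ (remaining : List Int), remaining.length ≤ k → remaining.Nodup →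
    ∀ (prev : Int) (form : List (Int × Int)),
    pvEnumB prev remaining form =
      (pvPermsA remaining).map (fun perm =>
        (perm.foldl (fun (st : List (Int × Int) × Int) v =>
          (st.1 ++ [(min st.2 v, max st.2 v)], v)) (form, prev)).1) := by
  induction k with
  | zero =>
    intro remaining hlen _ prev form
    have : remaining = [] := List.eq_nil_of_length_eq_zero (Nat.le_zero.mp hlen)
    subst this
    rw [pvEnumB_nil, pvPermsA_nil]
    simp
  | succ k ih =>
    intro remaining hlen hnd prev form
    rcases remaining with _ | ⟨x, xs⟩
    · rw [pvEnumB_nil, pvPermsA_nil]; simp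
    · rw [pvEnumB_cons, pvPermsA_cons, pvPicks_eq_map _ hnd, List.flatMap_map,
        List.map_flatMap]
      apply List.flatMap_congr
      intro v hv
      have hlt : ((x :: xs).erase v).length ≤ k := by
        rw [List.length_erase_of_mem hv]
        simp only [List.length_cons] at hlen ⊢
        omega
      have hnd' : ((x :: xs).erase v).Nodup := hnd.erase v
      rw [ih _ hlt hnd' v (form ++ [(min prev v, max prev v)])]
      simp [Function.comp]

-- ===== VERDICT (by name: the statement is the Claim_ definition above) =====
theorem generate_os_basis_recursive_py_spec : Claim_equal_generate_os_basis_recursive_py := by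
  intro n _
  unfold Spec_generate_os_basis_recursive_py generate_os_basis_recursive_py generate_os_basis_recursive_py_alt
  by_cases h1 : n ≤ 1
  · rw [PySem.List.pyRange_one_eq_nil (by omega), pvEnumB_nil]
    simp [h1]
  · by_cases h2 : n = 2
    · subst h2
      rw [show PySem.List.pyRange 1 2 1 = [1] from PySem.List.pyRange_one_singleton 1]
      norm_num
      rw [pvEnumB_cons]
      norm_num [pvPicks, pvEnumB_nil]
    · simp only [h1, h2, if_false]
      rw [pvEnumB_eq_map (PySem.List.pyRange 1 n 1).length _ le_rfl
        (PySem.List.nodup_pyRange_one 1 n)]
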